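-- pv_equiv track=rewrite | github.com/RodAli/Particle-Ecosystem | util.py | find_closest_coords_to_target_coord
-- ===== SOURCE A (Python) =====
-- def get_manhattan_distance(coord1, coord2):
--     return abs(coord1[0] - coord2[0]) + abs(coord1[1] - coord2[1])
--
-- def find_closest_coords_to_target_coord(target_coord: tuple, coords: list):
--     manhattan_distances = [get_manhattan_distance(target_coord, c) for c in coords]
--
--     closest_distance = min(manhattan_distances)
--
--     indexes = []
--     for i in range(len(manhattan_distances)):
--         if closest_distance == manhattan_distances[i]:
--             indexes.append(i)
--
--     closest_coords = []
--     for idx in indexes: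
--         closest_coords.append(coords[idx])
--
--     return closest_coords
-- ===== SOURCE B (Python) =====
-- def find_closest_coords_to_target_coord(target_coord: tuple, coords: list):
--     # Single pass: track the best distance so far and the coords achieving it.
--     best = None
--     result = []
--     for c in coords:
--         d = abs(target_coord[0] - c[0]) + abs(target_coord[1] - c[1])
--         if best is None or d < best:
--             best = d
--             result = [c]
--         elif d == best:
--             result.append(c)
--     return result
-- ===== Notes on version B (the rewrite author's own statement) =====
-- stated objective: alternative
-- what changed: Replaces A's three passes (distance list, min, index collection plus lookup) with one streaming pass keeping the running minimum distance and the list of coords achieving it.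
import Mathlib
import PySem

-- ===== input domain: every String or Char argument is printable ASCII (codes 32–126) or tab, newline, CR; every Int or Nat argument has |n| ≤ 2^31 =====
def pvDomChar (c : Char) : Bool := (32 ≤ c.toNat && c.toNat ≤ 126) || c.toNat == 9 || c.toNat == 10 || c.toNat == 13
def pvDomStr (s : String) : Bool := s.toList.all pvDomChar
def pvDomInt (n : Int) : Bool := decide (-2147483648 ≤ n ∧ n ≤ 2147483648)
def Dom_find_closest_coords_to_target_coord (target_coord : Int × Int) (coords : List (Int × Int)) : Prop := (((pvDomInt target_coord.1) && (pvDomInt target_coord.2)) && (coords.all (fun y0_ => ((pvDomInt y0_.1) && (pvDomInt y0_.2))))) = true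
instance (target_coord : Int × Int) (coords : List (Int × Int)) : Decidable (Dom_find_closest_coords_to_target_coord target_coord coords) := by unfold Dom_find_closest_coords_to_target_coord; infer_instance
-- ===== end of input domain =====

-- B replaces A's three passes (distance list, min, index collection, lookup) by one
-- streaming pass keeping the running minimum distance and the coords achieving it.

-- ===== PORT A =====
def get_manhattan_distance (coord1 coord2 : Int × Int) : Int :=
  |coord1.1 - coord2.1| + |coord1.2 - coord2.2|

-- Literal port of A. `min(...)` is PySem.List.min? (none = ValueError, excluded by Pre_).
-- Index lookups `manhattan_distances[i]` / `coords[idx]` use getD; exact here since every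
-- index produced by `range(len(...))` is in range.
def find_closest_coords_to_target_coord (target_coord : Int × Int) (coords : List (Int × Int)) : List (Int × Int) :=
  let manhattan_distances := coords.map (fun c => get_manhattan_distance target_coord c)
  match PySem.List.min? manhattan_distances (fun x => x) with
  | none => []  -- Python raises ValueError here; outside Pre_
  | some closest_distance =>
    let indexes := (List.range manhattan_distances.length).foldl
      (fun acc i => if closest_distance = manhattan_distances.getD i 0 then acc ++ [i] else acc) []
    indexes.foldl (fun acc idx => acc ++ [coords.getD idx (0, 0)]) []

-- ===== PORT B =====
def fcAltStep (target_coord : Int × Int) (st : Option Int × List (Int × Int)) (c : Int × Int) :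
    Option Int × List (Int × Int) :=
  let d := |target_coord.1 - c.1| + |target_coord.2 - c.2|
  match st.1 with
  | none => (some d, [c])
  | some b => if d < b then (some d, [c]) else if d = b then (some b, st.2 ++ [c]) else st

def find_closest_coords_to_target_coord_alt (target_coord : Int × Int) (coords : List (Int × Int)) : List (Int × Int) :=
  (coords.foldl (fcAltStep target_coord) (none, [])).2

-- ===== PRECONDITION & SPEC =====
-- A raises ValueError on empty coords (min of an empty sequence); excluded.
def Pre_find_closest_coords_to_target_coord (target_coord : Int × Int) (coords : List (Int × Int)) : Prop := coords ≠ []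
instance (target_coord : Int × Int) (coords : List (Int × Int)) : Decidable (Pre_find_closest_coords_to_target_coord target_coord coords) := by unfold Pre_find_closest_coords_to_target_coord; infer_instance

def pvWitness_find_closest_coords_to_target_coord : (Int × Int) × (List (Int × Int)) := ((0, 0), [(1, 2), (-1, 0)])

def Spec_find_closest_coords_to_target_coord (target_coord : Int × Int) (coords : List (Int × Int)) (out : List (Int × Int)) : Prop := out = find_closest_coords_to_target_coord_alt target_coord coords
instance (target_coord : Int × Int) (coords : List (Int × Int)) (out : List (Int × Int)) : Decidable (Spec_find_closest_coords_to_target_coord target_coord coords out) := by unfold Spec_find_closest_coords_to_target_coord; infer_instance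

-- ===== CLAIM (what is proved, stated in full; the proofs are below) =====
def Claim_equal_find_closest_coords_to_target_coord : Prop := ∀ (target_coord : Int × Int) (coords : List (Int × Int)), Dom_find_closest_coords_to_target_coord target_coord coords → Pre_find_closest_coords_to_target_coord target_coord coords → Spec_find_closest_coords_to_target_coord target_coord coords (find_closest_coords_to_target_coord target_coord coords)

-- ===== LEMMAS AND PROOFS =====

-- running minimum of the streamed distances (helper for the proofs only)
def fcMin (t : Int × Int) (b : Int) (cs : List (Int × Int)) : Int :=
  cs.foldl (fun m x => min m (get_manhattan_distance t x)) b

-- the running minimum never exceeds its seed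
theorem fc_foldl_min_le (t : Int × Int) (cs : List (Int × Int)) (b : Int) :
    fcMin t b cs ≤ b := by
  induction cs generalizing b with
  | nil => simp [fcMin]
  | cons c cs ih => exact le_trans (ih (min b (get_manhattan_distance t c))) (min_le_left _ _)

-- the index-collecting pass followed by the lookup pass is a filter of the prefix
theorem fc_range_filter_map (g : Int × Int → Int) (m : Int) (coords : List (Int × Int)) (n : Nat)
    (hn : n ≤ coords.length) :
    (((List.range n).filter (fun i => decide (m = (coords.map g).getD i 0))).map
        (fun i => coords.getD i ((0 : Int), (0 : Int)))) =
      (coords.take n).filter (fun x => decide (m = g x)) := by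
  induction n with
  | zero => simp
  | succ n ih =>
    have hlt : n < coords.length := hn
    have h1 : (coords.map g).getD n 0 = g coords[n] := by
      simp [List.getD_eq_getElem?_getD, List.getElem?_map, List.getElem?_eq_getElem hlt]
    have h2 : coords.getD n ((0 : Int), (0 : Int)) = coords[n] := by
      simp [List.getD_eq_getElem?_getD, List.getElem?_eq_getElem hlt]
    have h3 : coords.take (n + 1) = coords.take n ++ [coords[n]] := by
      rw [List.take_succ, List.getElem?_eq_getElem hlt]; rfl
    rw [List.range_succ, List.filter_append, List.map_append, ih (le_of_lt hlt), h3,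
      List.filter_append]
    have h4 : coords[n]? = some coords[n] := List.getElem?_eq_getElem hlt
    simp only [List.filter_cons, List.filter_nil, List.getD_eq_getElem?_getD,
      List.getElem?_map, h4, Option.map_some, Option.getD_some]
    by_cases hm : m = g coords[n] <;> simp [hm, h4]
-- A's result on a nonempty list is the filter by the minimal distance
theorem fc_A_filter (t c : Int × Int) (cs : List (Int × Int)) :
    find_closest_coords_to_target_coord t (c :: cs) =
      (c :: cs).filter
        (fun x => decide (fcMin t (get_manhattan_distance t c) cs = get_manhattan_distance t x)) := by
  have hmin : PySem.List.min? ((c :: cs).map (fun x => get_manhattan_distance t x)) (fun x => x)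
      = some (fcMin t (get_manhattan_distance t c) cs) := by
    rw [List.map_cons, PySem.List.min?_id_cons]
    simp [fcMin, List.foldl_map]
  simp only [find_closest_coords_to_target_coord, hmin,
    PySem.List.foldl_append_ite_eq_filter, PySem.List.foldl_append_singleton_eq_map,
    List.nil_append, List.length_map]
  exact fc_range_filter_map _ _ (c :: cs) (c :: cs).length le_rfl |>.trans (by rw [List.take_length])

-- invariant of B's streaming fold: once the best is `some b` with accumulator `acc`,
-- the fold ends in the running minimum and the filter of the rest (prefixed by acc iff kept)
theorem fc_B_inv (t : Int × Int) (cs : List (Int × Int)) (b : Int) (acc : List (Int × Int)) :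
    cs.foldl (fcAltStep t) (some b, acc) =
      (some (fcMin t b cs),
       (if fcMin t b cs < b then [] else acc)
         ++ cs.filter (fun x => decide (fcMin t b cs = get_manhattan_distance t x))) := by
  induction cs generalizing b acc with
  | nil => simp [fcMin]
  | cons c cs ih =>
    have hd : |t.1 - c.1| + |t.2 - c.2| = get_manhattan_distance t c := rfl
    set d := get_manhattan_distance t c with hdd
    have hM : fcMin t b (c :: cs) = fcMin t (min b d) cs := rfl
    rcases lt_trichotomy d b with h | h | h
    · have hstep : fcAltStep t (some b, acc) c = (some d, [c]) := by
        simp [fcAltStep, hd, h]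
      have hmbd : min b d = d := min_eq_right (le_of_lt h)
      have hle : fcMin t d cs ≤ d := fc_foldl_min_le t cs d
      rw [List.foldl_cons, hstep, ih, hM, hmbd]
      have hlb : fcMin t d cs < b := lt_of_le_of_lt hle h
      rcases eq_or_lt_of_le hle with he | hlt
      · simp [List.filter_cons, hlb, not_lt.mpr (le_of_eq he), he, h, ← hdd]
      · simp [List.filter_cons, hlb, hlt, ne_of_lt hlt, h, ← hdd]
    · have hstep : fcAltStep t (some b, acc) c = (some b, acc ++ [c]) := by
        simp [fcAltStep, hd, h]
      have hmbd : min b d = b := by rw [h]; exact min_self b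
      have hle : fcMin t b cs ≤ b := fc_foldl_min_le t cs b
      rw [List.foldl_cons, hstep, ih, hM, hmbd]
      rcases eq_or_lt_of_le hle with he | hlt
      · simp [List.filter_cons, not_lt.mpr (le_of_eq he), he, h, ← hdd, List.append_assoc]
      · simp [List.filter_cons, hlt, (ne_of_lt (h ▸ hlt) : fcMin t b cs ≠ d), ← hdd]
    · have hstep : fcAltStep t (some b, acc) c = (some b, acc) := by
        simp [fcAltStep, hd, not_lt.mpr (le_of_lt h), ne_of_gt h]
      have hmbd : min b d = b := min_eq_left (le_of_lt h)
      have hle : fcMin t b cs ≤ b := fc_foldl_min_le t cs b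
      rw [List.foldl_cons, hstep, ih, hM, hmbd]
      simp [List.filter_cons, (ne_of_lt (lt_of_le_of_lt hle h) : fcMin t b cs ≠ d), ← hdd,
        not_lt.mpr hle]

-- B's result on a nonempty list is the same filter
theorem fc_B_filter (t c : Int × Int) (cs : List (Int × Int)) :
    find_closest_coords_to_target_coord_alt t (c :: cs) =
      (c :: cs).filter
        (fun x => decide (fcMin t (get_manhattan_distance t c) cs = get_manhattan_distance t x)) := by
  unfold find_closest_coords_to_target_coord_alt
  have hstep : fcAltStep t (none, []) c = (some (get_manhattan_distance t c), [c]) := rfl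
  rw [List.foldl_cons, hstep, fc_B_inv]
  set d := get_manhattan_distance t c with hdd
  have hle : fcMin t d cs ≤ d := fc_foldl_min_le t cs d
  rcases eq_or_lt_of_le hle with he | hlt
  · simp [List.filter_cons, not_lt.mpr (le_of_eq he), he, ← hdd]
  · simp [List.filter_cons, hlt, ne_of_lt hlt, ← hdd]


-- ===== VERDICT (by name: the statement is the Claim_ definition above) =====
theorem find_closest_coords_to_target_coord_spec : Claim_equal_find_closest_coords_to_target_coord := by
  intro t coords _ hpre
  unfold Spec_find_closest_coords_to_target_coord
  cases coords with
  | nil => exact absurd rfl hpre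
  | cons c cs => rw [fc_A_filter, fc_B_filter]
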